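-- pv_equiv track=rewrite | github.com/mirokrastev/SoftUni-Courses | Python Fundamentals - January 2020/08-Text-Processing/Exercise/10-Winning-Ticket.py | if_win
-- ===== SOURCE A (Python) =====
-- def if_win(ticket):
--     left_half = ticket[0:10]
--     right_half = ticket[10:20]
--     combination = ''
--     win = False
--     symbol = None
--     for s in winning_symbols:
--         combination = ''
--         for i in range(6):
--             combination += s
--         if combination in left_half and combination in right_half:
--             win = True
--             symbol = s
--             break
--     return [win, symbol]
--
-- winning_symbols = ['@', '#', '$', '^']
-- ===== SOURCE B (Python) =====
-- winning_symbols = ['@', '#', '$', '^']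
--
--
-- def _run_chars(half):
--     """Characters that appear as a run of 6 consecutive equal chars in half."""
--     chars = set()
--     for i in range(len(half) - 5):
--         window = half[i:i + 6]
--         if window == window[0] * 6:
--             chars.add(window[0])
--     return chars
--
--
-- def if_win(ticket):
--     left = _run_chars(ticket[0:10])
--     right = _run_chars(ticket[10:20])
--     for s in winning_symbols:
--         if s in left and s in right:
--             return [True, s]
--     return [False, None]
-- ===== Notes on version B (the rewrite author's own statement) =====
-- stated objective: alternative
-- what changed: Instead of building each symbol's 6-repeat string and substring-searching both halves per symbol, B makes one sliding-window pass per half collecting the set of characters that form a 6-long constant window, then answers each winning symbol by set lookup.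
import Mathlib
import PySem

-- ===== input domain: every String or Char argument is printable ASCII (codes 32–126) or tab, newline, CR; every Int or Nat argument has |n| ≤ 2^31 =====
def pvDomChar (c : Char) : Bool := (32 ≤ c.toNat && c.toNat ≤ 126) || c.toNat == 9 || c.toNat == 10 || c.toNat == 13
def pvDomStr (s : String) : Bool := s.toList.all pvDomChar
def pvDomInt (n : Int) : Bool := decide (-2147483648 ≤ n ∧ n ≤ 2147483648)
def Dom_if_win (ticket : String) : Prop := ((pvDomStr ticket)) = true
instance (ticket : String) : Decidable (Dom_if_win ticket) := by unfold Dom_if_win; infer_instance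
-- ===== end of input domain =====

-- B replaces per-symbol substring searches by one sliding-window pass per half that
-- collects the characters forming a 6-long constant window, then looks each symbol up (alternative decomposition, same cost).


-- ===== PORT A =====
def winningSymbols : List String := ["@", "#", "$", "^"]

-- the 'for s in winning_symbols' loop of A, with its break as early return
def ifWinLoopA (left right : List Char) : List String → Bool × Option String
  | [] => (false, none)
  | s :: rest =>
    -- combination = ''; for i in range(6): combination += s
    let combination : List Char :=
      (PySem.List.pyRange 0 6 1).foldl (fun acc _ => acc ++ s.toList) []
    if PySem.Chars.isIn combination left && PySem.Chars.isIn combination right then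
      (true, some s)
    else
      ifWinLoopA left right rest

def if_win (ticket : String) : Bool × Option String :=
  let leftHalf := (PySem.Str.slice ticket (some 0) (some 10)).toList
  let rightHalf := (PySem.Str.slice ticket (some 10) (some 20)).toList
  ifWinLoopA leftHalf rightHalf winningSymbols

-- ===== PORT B =====
-- B's _run_chars: set of characters that head a 6-long constant window of half
def runChars (half : List Char) : PySem.Set String :=
  (PySem.List.pyRange 0 ((half.length : Int) - 5) 1).foldl
    (fun acc i =>
      let w := PySem.List.slice half (some i) (some (i + 6))
      match w with
      | c :: _ => if w == List.replicate 6 c then PySem.Set.add acc (String.ofList [c]) else acc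
      | [] => acc)  -- unreachable for i in range (window nonempty); totalisation only
    PySem.Set.empty

def ifWinLoopB (left right : PySem.Set String) : List String → Bool × Option String
  | [] => (false, none)
  | s :: rest =>
    if PySem.Set.contains left s && PySem.Set.contains right s then
      (true, some s)
    else
      ifWinLoopB left right rest

def winningSymbolsB : List String := ["@", "#", "$", "^"]

def if_win_alt (ticket : String) : Bool × Option String :=
  let left := runChars (PySem.Str.slice ticket (some 0) (some 10)).toList
  let right := runChars (PySem.Str.slice ticket (some 10) (some 20)).toList
  ifWinLoopB left right winningSymbolsB

-- ===== PRECONDITION & SPEC =====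
def Spec_if_win (ticket : String) (out : Bool × Option String) : Prop := out = if_win_alt ticket
instance (ticket : String) (out : Bool × Option String) : Decidable (Spec_if_win ticket out) := by unfold Spec_if_win; infer_instance

-- ===== CLAIM (what is proved, stated in full; the proofs are below) =====
def Claim_equal_if_win : Prop := ∀ (ticket : String), Dom_if_win ticket → Spec_if_win ticket (if_win ticket)

-- ===== LEMMAS AND PROOFS =====

-- the window test at index i, as an Option
def windowHit (half : List Char) (i : Int) : Option String :=
  let w := PySem.List.slice half (some i) (some (i + 6))
  match w with
  | c :: _ => if w == List.replicate 6 c then some (String.ofList [c]) else none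
  | [] => none

def stepFn (half : List Char) : PySem.Set String → Int → PySem.Set String :=
  fun acc i => match windowHit half i with
    | some y => PySem.Set.add acc y
    | none => acc

lemma runChars_eq_fold (half : List Char) :
    runChars half =
      (PySem.List.pyRange 0 ((half.length : Int) - 5) 1).foldl (stepFn half) PySem.Set.empty := by
  unfold runChars stepFn windowHit
  congr 1
  funext acc i
  cases h : PySem.List.slice half (some i) (some (i + 6)) with
  | nil => simp
  | cons c rest =>
    by_cases hw : rest = [c, c, c, c, c] <;> simp [hw]

lemma mem_foldl_stepFn (half : List Char) (l : List Int) (s : PySem.Set String) (x : String) :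
    x ∈ l.foldl (stepFn half) s ↔ x ∈ s ∨ ∃ i ∈ l, windowHit half i = some x := by
  induction l generalizing s with
  | nil => simp
  | cons i rest ih =>
    simp only [List.foldl_cons, ih]
    by_cases h : windowHit half i = some x
    · constructor
      · intro _; exact Or.inr ⟨i, by simp, h⟩
      · intro _
        cases hwin : windowHit half i with
        | none => rw [hwin] at h; exact absurd h (by simp)
        | some y =>
          have hyx : y = x := by rw [hwin] at h; exact Option.some.inj h
          exact Or.inl (by simp [stepFn, hwin, PySem.Set.mem_add, hyx])
    · have hstep : stepFn half s i = s ∨ ∃ y, windowHit half i = some y ∧ stepFn half s i = PySem.Set.add s y := by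
        cases hwin : windowHit half i with
        | none => exact Or.inl (by simp [stepFn, hwin])
        | some y => exact Or.inr ⟨y, rfl, by simp [stepFn, hwin]⟩
      rcases hstep with he | ⟨y, hwin, he⟩
      · rw [he]
        constructor
        · rintro (hs | ⟨j, hj, hx⟩)
          · exact Or.inl hs
          · exact Or.inr ⟨j, by simp [hj], hx⟩
        · rintro (hs | ⟨j, hj, hx⟩)
          · exact Or.inl hs
          · rcases List.mem_cons.mp hj with rfl | hj
            · exact absurd hx h
            · exact Or.inr ⟨j, hj, hx⟩
      · rw [he]
        have hyx : y ≠ x := fun he2 => h (he2 ▸ hwin)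
        constructor
        · rintro (hs | ⟨j, hj, hx⟩)
          · rcases (PySem.Set.mem_add _ _ _).mp hs with hs | rfl
            · exact Or.inl hs
            · exact absurd hwin h
          · exact Or.inr ⟨j, by simp [hj], hx⟩
        · rintro (hs | ⟨j, hj, hx⟩)
          · exact Or.inl ((PySem.Set.mem_add _ _ _).mpr (Or.inl hs))
          · rcases List.mem_cons.mp hj with rfl | hj
            · exact absurd hx h
            · exact Or.inr ⟨j, hj, hx⟩

lemma ofList_singleton_inj {c c' : Char} (h : String.ofList [c'] = String.ofList [c]) : c' = c := by
  have h2 := congrArg String.toList h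
  simpa using h2

lemma windowHit_eq_some_iff (half : List Char) (i : Int) (c : Char) :
    windowHit half i = some (String.ofList [c]) ↔
      PySem.List.slice half (some i) (some (i + 6)) = List.replicate 6 c := by
  unfold windowHit
  cases h : PySem.List.slice half (some i) (some (i + 6)) with
  | nil =>
    constructor
    · intro h0; exact absurd h0 (by simp)
    · intro h0; have hl := congrArg List.length h0; simp at hl
  | cons c' rest =>
    constructor
    · intro he
      by_cases hw : (c' :: rest) = List.replicate 6 c'
      · simp only [beq_iff_eq, hw, if_true, Option.some.injEq] at he
        exact (ofList_singleton_inj he) ▸ hw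
      · simp only [beq_iff_eq] at he
        rw [if_neg hw] at he
        exact absurd he (by simp)
    · intro he
      have hc : c' = c := by
        have h0 := congrArg List.head? he
        simpa using h0
      subst hc
      simp [he]

lemma slice_window (half : List Char) (j : ℕ) :
    PySem.List.slice half (some (j : Int)) (some ((j : Int) + 6)) = (half.drop j).take 6 := by
  have : ((j : Int) + 6) = ((j : Int) + ((6 : ℕ) : Int)) := by norm_num
  rw [this, PySem.List.slice_natCast_add]

-- the key characterisation: membership in runChars = the 6-repeat substring test
lemma mem_runChars_iff (half : List Char) (c : Char) :
    String.ofList [c] ∈ runChars half ↔ PySem.Chars.isIn (List.replicate 6 c) half = true := by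
  rw [← PySem.Chars.exists_prefix_drop_iff_isIn]
  rw [runChars_eq_fold, mem_foldl_stepFn]
  simp only [PySem.Set.empty, List.not_mem_nil, false_or]
  constructor
  · rintro ⟨i, hi, hwin⟩
    rw [PySem.List.mem_pyRange_one] at hi
    obtain ⟨j, rfl⟩ : ∃ j : ℕ, i = (j : Int) := ⟨i.toNat, by omega⟩
    rw [windowHit_eq_some_iff, slice_window] at hwin
    exact ⟨j, hwin ▸ List.take_prefix 6 (half.drop j)⟩
  · rintro ⟨j, hpre⟩
    have hlen : List.replicate 6 c = (half.drop j).take 6 := by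
      have h6 : (List.replicate 6 c).length = 6 := by simp
      rw [List.prefix_iff_eq_take] at hpre
      simpa [h6] using hpre
    have hjlen : j + 6 ≤ half.length := by
      have h1 : ((half.drop j).take 6).length = 6 := by rw [← hlen]; simp
      simp only [List.length_take, List.length_drop] at h1
      omega
    refine ⟨(j : Int), ?_, ?_⟩
    · rw [PySem.List.mem_pyRange_one]
      omega
    · rw [windowHit_eq_some_iff, slice_window]
      exact hlen.symm

-- A's built combination for a one-character symbol is the 6-fold replicate
lemma combination_eq (c : Char) :
    (PySem.List.pyRange 0 6 1).foldl (fun acc _ => acc ++ (String.ofList [c]).toList) []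
      = List.replicate 6 c := by
  have : PySem.List.pyRange 0 6 1 = [0, 1, 2, 3, 4, 5] := by decide
  rw [this]
  simp [List.foldl, List.replicate, String.toList_ofList]

lemma contains_runChars (half : List Char) (c : Char) :
    PySem.Set.contains (runChars half) (String.ofList [c])
      = PySem.Chars.isIn (List.replicate 6 c) half := by
  by_cases h : PySem.Chars.isIn (List.replicate 6 c) half = true
  · rw [h]
    exact (PySem.Set.contains_iff _ _).mpr ((mem_runChars_iff half c).mpr h)
  · have h' : PySem.Chars.isIn (List.replicate 6 c) half = false := by
      cases hb : PySem.Chars.isIn (List.replicate 6 c) half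
      · rfl
      · exact absurd hb h
    rw [h']
    cases hb : PySem.Set.contains (runChars half) (String.ofList [c])
    · rfl
    · exact absurd ((mem_runChars_iff half c).mp ((PySem.Set.contains_iff _ _).mp hb)) h

lemma loops_agree (left right : List Char) (syms : List String)
    (hs : ∀ s ∈ syms, ∃ c : Char, s = String.ofList [c]) :
    ifWinLoopA left right syms = ifWinLoopB (runChars left) (runChars right) syms := by
  induction syms with
  | nil => rfl
  | cons s rest ih =>
    obtain ⟨c, rfl⟩ := hs s (by simp)
    rw [ifWinLoopA, ifWinLoopB]
    simp only [combination_eq, contains_runChars]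
    split_ifs with h
    · rfl
    · exact ih (fun t ht => hs t (by simp [ht]))

-- ===== VERDICT (by name: the statement is the Claim_ definition above) =====
theorem if_win_spec : Claim_equal_if_win := by
  intro ticket _
  unfold Spec_if_win if_win if_win_alt
  have hws : winningSymbols = winningSymbolsB := rfl
  rw [hws]
  exact loops_agree _ _ winningSymbolsB (by
    intro s hsym
    simp only [winningSymbolsB, List.mem_cons, List.not_mem_nil, or_false] at hsym
    rcases hsym with rfl | rfl | rfl | rfl
    · exact ⟨'@', rfl⟩
    · exact ⟨'#', rfl⟩
    · exact ⟨'$', rfl⟩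
    · exact ⟨'^', rfl⟩)
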